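-- pv_equiv track=rewrite | github.com/Noob3rror/basic_programming | fun/simple_compression/buildlist.py | generate_byte_buckets
-- ===== SOURCE A (Python) =====
-- def generate_byte_buckets(total_values:int, value_size_in_bytes: int) -> list[tuple[int, int, int]]:
--     output: list[tuple[int, int, int]] = []
--
--     min: int = 0x00
--     max: int = 0xFF
--
--     maximum: int = sum(0xFF << (8 * i) for i in range(value_size_in_bytes))
--
--     bucket_size: int = total_values // value_size_in_bytes
--     remainder: int = total_values % value_size_in_bytes
--
--     while max <= maximum:
--         output.append((min, max, bucket_size + 1 if remainder > 0 else bucket_size))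
--
--         remainder -= 1
--
--         min = max + 1
--         max = max << 8 | 0xFF
--
--     return output
-- ===== SOURCE B (Python) =====
-- def generate_byte_buckets(total_values: int, value_size_in_bytes: int) -> list[tuple[int, int, int]]:
--     bucket_size = total_values // value_size_in_bytes
--     remainder = total_values % value_size_in_bytes
--     return [
--         (0 if i == 0 else 1 << (8 * i),
--          (1 << (8 * (i + 1))) - 1,
--          bucket_size + 1 if i < remainder else bucket_size)
--         for i in range(value_size_in_bytes)
--     ]
-- ===== Notes on version B (the rewrite author's own statement) =====
-- stated objective: simpler
-- what changed: Replaces A's while loop carrying shifted running state (min/max accumulators and a decremented remainder) and the separately summed maximum bound by a single index-driven comprehension computing each bucket in closed form (low = 0 or 256**i, high = 256**(i+1)-1, count from i < remainder).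
import Mathlib
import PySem

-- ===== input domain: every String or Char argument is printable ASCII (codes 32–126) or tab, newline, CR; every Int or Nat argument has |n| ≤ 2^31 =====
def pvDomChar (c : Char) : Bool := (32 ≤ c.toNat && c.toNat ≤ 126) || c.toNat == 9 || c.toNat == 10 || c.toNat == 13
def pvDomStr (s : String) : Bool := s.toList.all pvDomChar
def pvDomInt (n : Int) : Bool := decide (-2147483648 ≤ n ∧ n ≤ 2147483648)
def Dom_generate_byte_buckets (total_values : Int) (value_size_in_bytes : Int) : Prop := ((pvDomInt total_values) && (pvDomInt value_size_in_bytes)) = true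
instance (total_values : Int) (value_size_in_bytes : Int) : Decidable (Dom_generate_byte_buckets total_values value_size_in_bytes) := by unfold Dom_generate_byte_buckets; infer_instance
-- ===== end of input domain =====

-- B replaces A's while loop with shifted running state (min/max/remainder) by a single
-- index-driven map computing each bucket in closed form from its index (objective: simpler).

-- ===== PORT A =====
-- Python's `0xFF << (8 * i)`; exact for 0 ≤ i (range(…) yields only nonnegative i here)
def pvShlA (a : Int) (k : Int) : Int := a * 2 ^ k.toNat

-- A's while loop. `max << 8 | 0xFF` is written `mx * 256 + 255`, exact for 0 ≤ mx
-- (mx's low 8 bits are then zeroed by the shift); the invariant 0 ≤ mx — true from the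
-- start mx = 255 on — is carried as hypothesis hmx for termination.
def pvLoopA (maximum bucket_size : Int) (mn mx remainder : Int)
    (output : List (Int × Int × Int)) (hmx : 0 ≤ mx) : List (Int × Int × Int) :=
  if h : mx ≤ maximum then
    pvLoopA maximum bucket_size (mx + 1) (mx * 256 + 255) (remainder - 1)
      (output ++ [(mn, mx, if remainder > 0 then bucket_size + 1 else bucket_size)])
      (by positivity)
  else output
termination_by (maximum + 1 - mx).toNat
decreasing_by
  omega

def generate_byte_buckets (total_values : Int) (value_size_in_bytes : Int) : List (Int × Int × Int) :=
  let maximum : Int :=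
    ((PySem.List.pyRange 0 value_size_in_bytes 1).map (fun i => pvShlA 255 (8 * i))).sum
  let bucket_size : Int := PySem.Int.floordiv total_values value_size_in_bytes
  let remainder : Int := PySem.Int.mod total_values value_size_in_bytes
  pvLoopA maximum bucket_size 0 255 remainder [] (by norm_num)

-- ===== PORT B =====
-- `1 << (8 * i)` / `1 << (8 * (i + 1))`; exact for 0 ≤ i (range(…) yields only nonnegative i here)
def generate_byte_buckets_alt (total_values : Int) (value_size_in_bytes : Int) : List (Int × Int × Int) :=
  let bucket_size : Int := PySem.Int.floordiv total_values value_size_in_bytes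
  let remainder : Int := PySem.Int.mod total_values value_size_in_bytes
  (PySem.List.pyRange 0 value_size_in_bytes 1).map (fun i =>
    ((if i == 0 then 0 else (1 : Int) <<< ((8 : Int) * i).toNat),
     ((1 : Int) <<< ((8 : Int) * (i + 1)).toNat) - 1,
     if i < remainder then bucket_size + 1 else bucket_size))

-- ===== PRECONDITION & SPEC =====
-- Pre_ excludes only value_size_in_bytes = 0, where both Pythons raise ZeroDivisionError.
def Pre_generate_byte_buckets (total_values : Int) (value_size_in_bytes : Int) : Prop :=
  value_size_in_bytes ≠ 0
instance (total_values : Int) (value_size_in_bytes : Int) : Decidable (Pre_generate_byte_buckets total_values value_size_in_bytes) := by unfold Pre_generate_byte_buckets; infer_instance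
def pvWitness_generate_byte_buckets : Int × Int := (10, 3)

def Spec_generate_byte_buckets (total_values : Int) (value_size_in_bytes : Int) (out : List (Int × Int × Int)) : Prop := out = generate_byte_buckets_alt total_values value_size_in_bytes
instance (total_values : Int) (value_size_in_bytes : Int) (out : List (Int × Int × Int)) : Decidable (Spec_generate_byte_buckets total_values value_size_in_bytes out) := by unfold Spec_generate_byte_buckets; infer_instance

-- ===== CLAIM (what is proved, stated in full; the proofs are below) =====
def Claim_equal_generate_byte_buckets : Prop := ∀ (total_values : Int) (value_size_in_bytes : Int), Dom_generate_byte_buckets total_values value_size_in_bytes → Pre_generate_byte_buckets total_values value_size_in_bytes → Spec_generate_byte_buckets total_values value_size_in_bytes (generate_byte_buckets total_values value_size_in_bytes)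

-- ===== LEMMAS AND PROOFS =====

-- B's per-index bucket, specialised to a Nat index
def pvBucketB (bs rem : Int) (i : Nat) : Int × Int × Int :=
  ((if i = 0 then 0 else 256 ^ i), 256 ^ (i + 1) - 1,
   if (i : Int) < rem then bs + 1 else bs)

lemma pvLoopA_congr (maximum bs mn mx rem mn' mx' rem' : Int)
    (acc : List (Int × Int × Int)) (h1 : mn = mn') (h2 : mx = mx') (h3 : rem = rem')
    (hmx : 0 ≤ mx) (hmx' : 0 ≤ mx') :
    pvLoopA maximum bs mn mx rem acc hmx = pvLoopA maximum bs mn' mx' rem' acc hmx' := by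
  subst h1; subst h2; subst h3; rfl

lemma pvMaximumSum (n : Nat) :
    ((List.range n).map (fun k : Nat => pvShlA 255 (8 * ((0 : Int) + (k : Int))))).sum
      = 256 ^ n - 1 := by
  induction n with
  | zero => simp
  | succ m ih =>
    rw [List.range_succ]
    simp only [List.map_append, List.sum_append, List.map_cons, List.map_nil, List.sum_cons,
      List.sum_nil, ih]
    have : pvShlA 255 (8 * ((0 : Int) + (m : Int))) = 255 * 256 ^ m := by
      simp only [pvShlA, zero_add]
      have h1 : ((8 * (m : Int)).toNat) = 8 * m := by omega
      rw [h1, pow_mul]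
      norm_num
    rw [this]; ring

lemma pvPowSub_nonneg (k : Nat) : (0 : Int) ≤ 256 ^ k - 1 := by
  have : (1 : Int) ≤ 256 ^ k := one_le_pow₀ (by norm_num)
  omega

lemma pvLoopA_inv (bs rem : Int) (n : Nat) :
    ∀ (d k : Nat) (acc : List (Int × Int × Int)) (m : Int) (hmx : 0 ≤ 256 ^ (k + 1) - 1),
      k + d = n → m = (if k = 0 then (0 : Int) else 256 ^ k) →
      pvLoopA (256 ^ n - 1) bs m (256 ^ (k + 1) - 1) (rem - k) acc hmx
        = acc ++ (List.range d).map (fun j => pvBucketB bs rem (k + j)) := by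
  intro d
  induction d with
  | zero =>
    intro k acc m hmx hkd hm
    rw [pvLoopA]
    have hlt : (256 : Int) ^ n < 256 ^ (k + 1) := by
      apply pow_lt_pow_right₀ (by norm_num) (by omega)
    rw [dif_neg (by omega)]
    simp
  | succ d ih =>
    intro k acc m hmx hkd hm
    rw [pvLoopA]
    have hle : (256 : Int) ^ (k + 1) ≤ 256 ^ n := by
      apply pow_le_pow_right₀ (by norm_num) (by omega)
    rw [dif_pos (by omega)]
    have hstep := pvLoopA_congr (256 ^ n - 1) bs
      (256 ^ (k + 1) - 1 + 1) ((256 ^ (k + 1) - 1) * 256 + 255) (rem - (k : Int) - 1)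
      (if k + 1 = 0 then (0 : Int) else 256 ^ (k + 1)) (256 ^ (k + 1 + 1) - 1)
      (rem - ((k + 1 : Nat) : Int))
      (acc ++ [(m, 256 ^ (k + 1) - 1, if rem - (k : Int) > 0 then bs + 1 else bs)])
      (by simp) (by rw [pow_succ]; ring) (by push_cast; ring)
      (by exact add_nonneg (mul_nonneg (pvPowSub_nonneg (k + 1)) (by norm_num)) (by norm_num))
      (pvPowSub_nonneg _)
    rw [hstep, ih (k + 1) _ _ (pvPowSub_nonneg _) (by omega) rfl]
    have hbucket : (m, 256 ^ (k + 1) - 1, if rem - (k : Int) > 0 then bs + 1 else bs)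
        = pvBucketB bs rem k := by
      simp only [pvBucketB, hm, gt_iff_lt, sub_pos]
    rw [hbucket]
    have hsplit : (List.range (d + 1)).map (fun j => pvBucketB bs rem (k + j))
        = pvBucketB bs rem k :: (List.range d).map (fun j => pvBucketB bs rem (k + 1 + j)) := by
      rw [List.range_succ_eq_map]
      simp only [List.map_cons, List.map_map, Nat.add_zero]
      congr 1
      apply List.map_congr_left
      intro a _
      simp only [Function.comp]
      congr 1
      omega
    rw [hsplit]
    simp

lemma pvOneShl (m : Nat) : (1 : Int) <<< (8 * m) = 256 ^ m := by
  have h : (1 : Int) <<< (8 * m) = 2 ^ (8 * m) := by simp [Int.shiftLeft_eq]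
  rw [h, pow_mul]; norm_num

lemma pvBucketB_cast (bs rem : Int) (k : Nat) :
    ((if ((0 : Int) + (k : Int)) == 0 then (0 : Int)
        else (1 : Int) <<< (8 * ((0 : Int) + (k : Int))).toNat),
      ((1 : Int) <<< (8 * (((0 : Int) + (k : Int)) + 1)).toNat) - 1,
      if ((0 : Int) + (k : Int)) < rem then bs + 1 else bs) = pvBucketB bs rem (0 + k) := by
  simp only [pvBucketB, zero_add]
  have h1 : ((8 * (k : Int))).toNat = 8 * k := by omega
  have h2 : ((8 * ((k : Int) + 1))).toNat = 8 * (k + 1) := by omega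
  rw [h1, h2, pvOneShl, pvOneShl]
  congr 1
  simp [beq_iff_eq]

-- ===== VERDICT (by name: the statement is the Claim_ definition above) =====
theorem generate_byte_buckets_spec : Claim_equal_generate_byte_buckets := by
  intro tv v _ hv
  unfold Spec_generate_byte_buckets generate_byte_buckets generate_byte_buckets_alt
  simp only []
  rw [PySem.List.pyRange_one 0 v, List.map_map, List.map_map]
  rcases le_or_gt v 0 with hle | hpos
  · have : (v - 0).toNat = 0 := by omega
    rw [this]
    simp only [List.range_zero, List.map_nil, List.sum_nil]
    rw [pvLoopA]
    norm_num
  · set n := (v - 0).toNat with hn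
    have hn1 : 1 ≤ n := by omega
    rw [show ((List.range n).map
          ((fun i => pvShlA 255 (8 * i)) ∘ fun k : Nat => (0 : Int) + (k : Int))).sum
        = 256 ^ n - 1 from pvMaximumSum n]
    have hstart := pvLoopA_congr (256 ^ n - 1) (PySem.Int.floordiv tv v) 0 255
      (PySem.Int.mod tv v) (if 0 = 0 then (0 : Int) else 256 ^ 0) (256 ^ (0 + 1) - 1)
      (PySem.Int.mod tv v - ((0 : Nat) : Int)) []
      (by norm_num) (by norm_num) (by norm_num) (by norm_num) (pvPowSub_nonneg _)
    rw [hstart, pvLoopA_inv (PySem.Int.floordiv tv v) (PySem.Int.mod tv v) n n 0 [] _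
      (pvPowSub_nonneg _) (by omega) rfl]
    simp only [List.nil_append]
    apply List.map_congr_left
    intro k _
    simp only [Function.comp]
    exact (pvBucketB_cast _ _ k).symm
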